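-- pv_equiv track=rewrite | github.com/kavurisrikanth/competitive_programming | Week 2/Exam/MorseCode.py | get_unique_transformations
-- ===== SOURCE A (Python) =====
-- def get_unique_transformations(words):
--     for i in range(len(words)):
--         words[i] = transform(words[i])
--
--     ans = 0
--     for i in range(len(words)):
--         one = words[i]
--         for j in range(i + 1, len(words)):
--             two = words[j]
--             if one == two:
--                 ans -= 1
--                 break
--         ans += 1
--
--     return ans
--
-- def transform(s):
--     code = {
--         'A': ".-",
--         'B': "-...",
--         'C': "-.-.",
--         'D': "-..",
--         'E': ".",
--         'F': "..-.",
--         'G': "--.",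
--         'H': "....",
--         'I': "..",
--         'J': ".---",
--         'K': "-.-",
--         'L': ".-..",
--         'M': "--", 'N': "-.",
--         'O': "---",
--         'P': ".--.",
--         'Q': "--.-",
--         'R': ".-.",
--         'S': "...",
--         'T': "-",
--         'U': "..-",
--         'V': "...-",
--         'W': ".--",
--         'X': "-..-",
--         'Y': "-.--",
--         'Z': "--.."}
--
--     ans = ''
--     for c in s:
--         ans += code[c.upper()]
--
--     return ans
-- ===== SOURCE B (Python) =====
-- def get_unique_transformations(words):
--     for i in range(len(words)):
--         words[i] = transform(words[i])
--     count = 0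
--     prev = None
--     for w in sorted(words):
--         if w != prev:
--             count += 1
--         prev = w
--     return count
--
-- def transform(s):
--     code = {
--         'A': ".-", 'B': "-...", 'C': "-.-.", 'D': "-..", 'E': ".",
--         'F': "..-.", 'G': "--.", 'H': "....", 'I': "..", 'J': ".---",
--         'K': "-.-", 'L': ".-..", 'M': "--", 'N': "-.", 'O': "---",
--         'P': ".--.", 'Q': "--.-", 'R': ".-.", 'S': "...", 'T': "-",
--         'U': "..-", 'V': "...-", 'W': ".--", 'X': "-..-", 'Y': "-.--",
--         'Z': "--.."}
--     return ''.join(code[c.upper()] for c in s)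
-- ===== Notes on version B (the rewrite author's own statement) =====
-- stated objective: faster
-- what changed: The quadratic nested pairwise duplicate scan is replaced by sorting a copy of the transformed words and one linear walk counting elements that differ from their predecessor; transform builds its string with ''.join instead of repeated concatenation.
import Mathlib
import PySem

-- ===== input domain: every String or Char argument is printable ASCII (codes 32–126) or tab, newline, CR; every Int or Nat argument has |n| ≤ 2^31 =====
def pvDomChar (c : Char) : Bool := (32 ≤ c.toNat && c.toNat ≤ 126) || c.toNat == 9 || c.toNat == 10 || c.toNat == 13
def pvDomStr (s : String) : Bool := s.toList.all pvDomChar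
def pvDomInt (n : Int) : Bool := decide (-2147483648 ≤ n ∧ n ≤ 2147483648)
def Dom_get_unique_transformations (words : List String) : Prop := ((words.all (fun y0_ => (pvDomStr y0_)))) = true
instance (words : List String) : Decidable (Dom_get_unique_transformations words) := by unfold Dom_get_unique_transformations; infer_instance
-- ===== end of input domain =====

-- B replaces A's quadratic nested duplicate scan by sorting a copy of the transformed
-- words and one linear walk counting elements that differ from their predecessor
-- (both versions mutate `words` the same way; equivalence here is about the return value).

-- ===== PORT A =====
-- the Morse `code` dict of A's `transform`
def pvMorse : PySem.Dict Char String :=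
  PySem.Dict.ofList [('A', ".-"), ('B', "-..."), ('C', "-.-."), ('D', "-.."), ('E', "."),
   ('F', "..-."), ('G', "--."), ('H', "...."), ('I', ".."), ('J', ".---"),
   ('K', "-.-"), ('L', ".-.."), ('M', "--"), ('N', "-."), ('O', "---"),
   ('P', ".--."), ('Q', "--.-"), ('R', ".-."), ('S', "..."), ('T', "-"),
   ('U', "..-"), ('V', "...-"), ('W', ".--"), ('X', "-..-"), ('Y', "-.--"),
   ('Z', "--..")]

-- A's transform(s): ans = ''; for c in s: ans += code[c.upper()]  (KeyError → excluded by
-- Pre_; the default "" is never reached inside Pre_)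
def pvTransform (s : String) : String :=
  String.ofList (s.toList.foldl (fun ans c => ans ++ (PySem.Dict.getD pvMorse c.toUpper "").toList) [])

-- inner loop: for j in range(i+1, len): if one == words[j]: ans -= 1; break — then ans += 1
def pvInnerA (one : String) : List String → Int → Int
  | [], ans => ans + 1
  | two :: rs, ans => if one = two then (ans - 1) + 1 else pvInnerA one rs ans

-- outer loop over i (words[i] = head, words[i+1:] = tail of the suffix)
def pvOuterA : List String → Int → Int
  | [], ans => ans
  | one :: rest, ans => pvOuterA rest (pvInnerA one rest ans)

def get_unique_transformations (words : List String) : Int :=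
  let ws := words.map pvTransform    -- for i in range(len(words)): words[i] = transform(words[i])
  pvOuterA ws 0

-- ===== PORT B =====
-- B's transform(s): ''.join(code[c.upper()] for c in s)
def pvTransformB (s : String) : String :=
  String.ofList (s.toList.flatMap (fun c => (PySem.Dict.getD pvMorse c.toUpper "").toList))

-- for w in sorted(words): if w != prev: count += 1; prev = w
def pvScanB : Option String → List String → Int → Int
  | _, [], count => count
  | prev, w :: rs, count => pvScanB (some w) rs (if prev = some w then count else count + 1)

def get_unique_transformations_alt (words : List String) : Int :=
  let ws := words.map pvTransformB   -- same in-place transform loop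
  pvScanB none (PySem.List.sorted ws (fun x => x) false) 0

-- ===== PRECONDITION & SPEC =====
-- Pre_ excludes exactly the inputs on which Python A raises KeyError in transform:
-- any word containing a character that is not an ASCII letter.
def Pre_get_unique_transformations (words : List String) : Prop :=
  (words.all (fun w => w.toList.all Char.isAlpha)) = true
instance (words : List String) : Decidable (Pre_get_unique_transformations words) := by
  unfold Pre_get_unique_transformations; infer_instance

def pvWitness_get_unique_transformations : List String := ["gin", "zen", "gig", "msg"]

def Spec_get_unique_transformations (words : List String) (out : Int) : Prop := out = get_unique_transformations_alt words
instance (words : List String) (out : Int) : Decidable (Spec_get_unique_transformations words out) := by unfold Spec_get_unique_transformations; infer_instance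

-- ===== CLAIM (what is proved, stated in full; the proofs are below) =====
def Claim_equal_get_unique_transformations : Prop := ∀ (words : List String), Dom_get_unique_transformations words → Pre_get_unique_transformations words → Spec_get_unique_transformations words (get_unique_transformations words)

-- ===== LEMMAS AND PROOFS =====

-- the two transforms agree: repeated append is the flatMap
theorem pvTransform_eq (s : String) : pvTransform s = pvTransformB s := by
  unfold pvTransform pvTransformB
  rw [PySem.List.foldl_append_eq_flatMap]
  simp

-- the inner scan of A returns ans when `one` occurs later, ans + 1 otherwise
theorem pvInnerA_eq (one : String) (rest : List String) (ans : Int) :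
    pvInnerA one rest ans = if one ∈ rest then ans else ans + 1 := by
  induction rest generalizing ans with
  | nil => simp [pvInnerA]
  | cons two rs ih =>
    by_cases h : one = two
    · simp [pvInnerA, h]
    · simp [pvInnerA, h, ih]

-- A's outer loop adds the number of distinct elements (= length of dedup)
theorem pvOuterA_eq (l : List String) (ans : Int) :
    pvOuterA l ans = ans + l.dedup.length := by
  induction l generalizing ans with
  | nil => simp [pvOuterA]
  | cons x r ih =>
    rw [pvOuterA, ih, pvInnerA_eq, List.dedup_cons]
    by_cases h : x ∈ r
    · simp [h]
    · have h' : x ∉ r.dedup := fun hm => h (List.mem_dedup.mp hm)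
      simp [h]
      omega

-- number of increments B's scan performs, as a Nat
def pvCntB : Option String → List String → Nat
  | _, [] => 0
  | prev, w :: rs => (if prev = some w then 0 else 1) + pvCntB (some w) rs

theorem pvScanB_eq_cnt (prev : Option String) (l : List String) (c : Int) :
    pvScanB prev l c = c + pvCntB prev l := by
  induction l generalizing prev c with
  | nil => simp [pvScanB, pvCntB]
  | cons w rs ih =>
    rw [pvScanB, pvCntB, ih]
    by_cases h : prev = some w <;> simp [h] <;> ring

-- in a nondecreasing list, a head element recurs iff it is the next head
theorem mem_iff_head (w : String) (rs : List String)
    (hs : (w :: rs).Pairwise (· ≤ ·)) : w ∈ rs ↔ rs.head? = some w := by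
  constructor
  · intro hm
    cases rs with
    | nil => simp at hm
    | cons x t =>
      have hwx : w ≤ x := (List.pairwise_cons.mp hs).1 x (by simp)
      have hxw : x ≤ w := by
        rcases List.mem_cons.mp hm with h | h
        · exact le_of_eq h.symm
        · exact (List.pairwise_cons.mp (List.pairwise_cons.mp hs).2).1 w h
      simp [le_antisymm hxw hwx]
  · intro hh
    cases rs with
    | nil => simp at hh
    | cons x t => simp at hh; simp [hh]

-- on a sorted list, the increment count is the number of distinct elements,
-- minus one when the list starts with the previous element
theorem pvCntB_sorted (l : List String) (prev : Option String)
    (hs : l.Pairwise (· ≤ ·)) :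
    pvCntB prev l = l.dedup.length - (if l.head? = prev then 1 else 0) := by
  induction l generalizing prev with
  | nil =>
    cases prev <;> simp [pvCntB]
  | cons w rs ih =>
    have hs' : rs.Pairwise (· ≤ ·) := (List.pairwise_cons.mp hs).2
    rw [pvCntB, ih (some w) hs', List.dedup_cons]
    have hiff := mem_iff_head w rs hs
    by_cases hm : w ∈ rs
    · have hh : rs.head? = some w := hiff.mp hm
      have hlen : 1 ≤ rs.dedup.length :=
        List.length_pos_of_mem (List.mem_dedup.mpr hm)
      by_cases hp : prev = some w <;> simp [hm, hh, hp, eq_comm] <;> omega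
    · have hh : ¬ rs.head? = some w := fun h => hm (hiff.mpr h)
      by_cases hp : prev = some w <;> simp [hm, hh, hp, eq_comm]
      omega

-- sorting preserves the number of distinct elements
theorem dedup_length_sorted (l : List String) :
    (PySem.List.sorted l (fun x => x) false).dedup.length = l.dedup.length :=
  (PySem.List.sorted_perm l (fun x => x) false).dedup.length_eq

-- ===== VERDICT (by name: the statement is the Claim_ definition above) =====
theorem get_unique_transformations_spec : Claim_equal_get_unique_transformations := by
  intro words _ _
  unfold Spec_get_unique_transformations get_unique_transformations get_unique_transformations_alt
  have hmap : words.map pvTransform = words.map pvTransformB :=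
    List.map_congr_left (fun s _ => pvTransform_eq s)
  rw [hmap]
  set ws := words.map pvTransformB with hws
  have hsorted : (PySem.List.sorted ws (fun x => x) false).Pairwise (· ≤ ·) := by
    simpa using PySem.List.sorted_pairwise ws (fun x => x)
  rw [pvOuterA_eq, pvScanB_eq_cnt, pvCntB_sorted _ _ hsorted, dedup_length_sorted]
  cases hnil : PySem.List.sorted ws (fun x => x) false with
  | nil =>
    have hw : ws = [] := (PySem.List.sorted_eq_nil_iff ws (fun x => x) false).mp hnil
    simp [hw]
  | cons a t => simp
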